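-- pv_equiv track=rewrite | github.com/dementive/JominiTools | src/game_objects.py | write_syntax
-- ===== SOURCE A (Python) =====
-- from typing import Any, Dict, List, Set
--
-- def write_syntax(li: List[str], header: str, scope: str):
--     string = ""
--     count = 0
--     string += f"\n    # Generated {header}\n    - match: \\b("
--     for i in li:
--         count += 1
--         # Count is needed to split because columns are waaay too long for syntax regex
--         if count == 0:
--             string = f")\\b\n      scope: {scope}\n"
--             string += f"    # Generated {header}\n    - match: \\b({i}|"
--         elif count == 75:
--             string += f")\\b\n      scope: {scope}\n"
--             string += f"    # Generated {header}\n    - match: \\b({i}|"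
--             count = 1
--         else:
--             string += f"{i}|"
--     string += f")\\b\n      scope: {scope}"
--     return string
-- ===== SOURCE B (Python) =====
-- def write_syntax(li, header, scope):
--     chunks = [li[i:i + 74] for i in range(0, len(li), 74)] or [[]]
--     return "".join(
--         f"\n    # Generated {header}\n    - match: \\b("
--         + "".join(f"{x}|" for x in chunk)
--         + f")\\b\n      scope: {scope}"
--         for chunk in chunks
--     )
-- ===== Notes on version B (the rewrite author's own statement) =====
-- stated objective: simpler
-- what changed: B replaces A's stateful counter loop (with its dead count==0 branch and in-place block splicing) by slicing the list into 74-token chunks up front and joining one independently formatted block per chunk.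
import Mathlib
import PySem

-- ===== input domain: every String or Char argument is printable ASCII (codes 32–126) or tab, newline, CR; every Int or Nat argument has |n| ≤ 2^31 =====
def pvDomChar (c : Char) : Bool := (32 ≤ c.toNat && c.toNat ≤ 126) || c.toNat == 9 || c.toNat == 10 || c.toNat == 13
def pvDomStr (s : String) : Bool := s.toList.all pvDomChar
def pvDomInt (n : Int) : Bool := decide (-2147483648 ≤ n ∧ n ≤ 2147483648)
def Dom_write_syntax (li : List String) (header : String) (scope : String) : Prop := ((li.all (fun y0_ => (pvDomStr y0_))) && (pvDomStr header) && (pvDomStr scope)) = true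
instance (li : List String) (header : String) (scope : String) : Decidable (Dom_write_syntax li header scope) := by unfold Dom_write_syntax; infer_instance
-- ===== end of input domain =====

-- B builds the chunks of 74 tokens up front and joins one block per chunk, replacing A's
-- counter state machine; objective: simpler. Return value only; no mutation involved.


-- ===== PORT A =====
-- one iteration of A's for-loop; state = (string, count)
def wsStep (header scope : String) (st : String × Int) (i : String) : String × Int :=
  let count := st.2 + 1
  if count == 0 then
    ((")\\b\n      scope: " ++ scope ++ "\n") ++
      ("    # Generated " ++ header ++ "\n    - match: \\b(" ++ i ++ "|"), count)
  else if count == 75 then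
    (st.1 ++ (")\\b\n      scope: " ++ scope ++ "\n") ++
      ("    # Generated " ++ header ++ "\n    - match: \\b(" ++ i ++ "|"), 1)
  else
    (st.1 ++ (i ++ "|"), count)

def write_syntax (li : List String) (header : String) (scope : String) : String :=
  let string := "" ++ ("\n    # Generated " ++ header ++ "\n    - match: \\b(")
  let st := li.foldl (wsStep header scope) (string, 0)
  st.1 ++ (")\\b\n      scope: " ++ scope)

-- ===== PORT B =====
-- chunks of 74 (Source B's list-slice comprehension)
def wsChunks (xs : List String) : List (List String) :=
  if xs.isEmpty then [] else xs.take 74 :: wsChunks (xs.drop 74)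
termination_by xs.length
decreasing_by
  rename_i h
  rw [List.length_drop]
  have : xs.length ≠ 0 := by
    simpa [List.isEmpty_iff, List.length_eq_zero_iff] using h
  omega

def wsBlock (header scope : String) (c : List String) : String :=
  "\n    # Generated " ++ header ++ "\n    - match: \\b(" ++
    String.join (c.map (fun x => x ++ "|")) ++
    ")\\b\n      scope: " ++ scope

def write_syntax_alt (li : List String) (header : String) (scope : String) : String :=
  let chunks := if li.isEmpty then [[]] else wsChunks li
  String.join (chunks.map (wsBlock header scope))

-- ===== PRECONDITION & SPEC =====
def Spec_write_syntax (li : List String) (header : String) (scope : String) (out : String) : Prop := out = write_syntax_alt li header scope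
instance (li : List String) (header : String) (scope : String) (out : String) : Decidable (Spec_write_syntax li header scope out) := by unfold Spec_write_syntax; infer_instance

-- ===== CLAIM (what is proved, stated in full; the proofs are below) =====
def Claim_equal_write_syntax : Prop := ∀ (li : List String) (header : String) (scope : String), Dom_write_syntax li header scope → Spec_write_syntax li header scope (write_syntax li header scope)

-- ===== LEMMAS AND PROOFS =====

lemma wsChunks_nil : wsChunks [] = [] := by simp [wsChunks]

lemma wsChunks_cons (x : String) (xs : List String) :
    wsChunks (x :: xs) = (x :: xs.take 73) :: wsChunks (xs.drop 73) := by
  rw [wsChunks]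
  simp only [List.isEmpty_cons, Bool.false_eq_true, if_false,
    show (74 : Nat) = 73 + 1 from rfl, List.take_succ_cons, List.drop_succ_cons]

lemma foldl_append_shift (l : List String) : ∀ s : String,
    l.foldl (· ++ ·) s = s ++ l.foldl (· ++ ·) "" := by
  induction l with
  | nil => intro s; simp
  | cons a l ih =>
    intro s
    rw [List.foldl_cons, List.foldl_cons, ih, ih ("" ++ a)]
    simp [String.append_assoc]

lemma lit_nl (t : String) : "\n" ++ ("    # Generated " ++ t) = "\n    # Generated " ++ t := by
  rw [← String.append_assoc]
  congr 1

lemma join_nil : String.join ([] : List String) = "" := rfl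

lemma join_cons (a : String) (l : List String) :
    String.join (a :: l) = a ++ String.join l := by
  simp only [String.join, List.foldl_cons]
  rw [foldl_append_shift]
  simp

-- the main loop invariant: from any state (s, k) with 0 ≤ k ≤ 74, the loop fills the
-- current block with the next 74 - k tokens and then emits one block per 74-chunk of the rest
lemma loop_eq (header scope : String) :
    ∀ (xs : List String) (s : String) (k : Nat), k ≤ 74 →
      (xs.foldl (wsStep header scope) (s, (k : Int))).1 ++ (")\\b\n      scope: " ++ scope) =
        s ++ String.join ((xs.take (74 - k)).map (fun x => x ++ "|")) ++
          (")\\b\n      scope: " ++ scope) ++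
          String.join ((wsChunks (xs.drop (74 - k))).map (wsBlock header scope)) := by
  intro xs
  induction xs with
  | nil =>
    intro s k hk
    simp [wsChunks_nil, String.join]
  | cons x rest ih =>
    intro s k hk
    by_cases h74 : k = 74
    · subst h74
      have hstep : wsStep header scope (s, ((74 : Nat) : Int)) x =
          (s ++ (")\\b\n      scope: " ++ scope ++ "\n") ++
            ("    # Generated " ++ header ++ "\n    - match: \\b(" ++ x ++ "|"), ((1 : Nat) : Int)) := by
        norm_num [wsStep]
      rw [List.foldl_cons, hstep, ih _ 1 (by omega)]
      rw [Nat.sub_self, List.take_zero, List.drop_zero, wsChunks_cons, List.map_cons,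
        join_cons]
      simp only [List.map_nil, join_nil, wsBlock, List.map_cons, join_cons,
        show (74 - 1 : Nat) = 73 from rfl]
      simp only [String.append_assoc, String.append_empty]
      rw [lit_nl]
    · have hk' : k + 1 ≤ 74 := by omega
      have hstep : wsStep header scope (s, (k : Int)) x = (s ++ (x ++ "|"), ((k + 1 : Nat) : Int)) := by
        simp only [wsStep]
        have h0 : ((k : Int) + 1 == 0) = false := by simp; omega
        have h75 : ((k : Int) + 1 == 75) = false := by simp; omega
        simp [h0, h75]
      rw [List.foldl_cons, hstep, ih _ (k + 1) hk']
      have ht : (x :: rest).take (74 - k) = x :: rest.take (74 - (k + 1)) := by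
        rw [show 74 - k = (74 - (k + 1)) + 1 by omega, List.take_succ_cons]
      have hd : (x :: rest).drop (74 - k) = rest.drop (74 - (k + 1)) := by
        rw [show 74 - k = (74 - (k + 1)) + 1 by omega, List.drop_succ_cons]
      rw [ht, hd, List.map_cons, join_cons]
      simp [String.append_assoc]

-- ===== VERDICT (by name: the statement is the Claim_ definition above) =====
theorem write_syntax_spec : Claim_equal_write_syntax := by
  intro li header scope _
  show write_syntax li header scope = write_syntax_alt li header scope
  unfold write_syntax write_syntax_alt
  have h := loop_eq header scope li
      ("" ++ ("\n    # Generated " ++ header ++ "\n    - match: \\b(")) 0 (by omega)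
  simp only [Nat.cast_zero, Nat.sub_zero] at h
  cases li with
  | nil =>
    simp only [List.isEmpty_nil, if_true, List.map_cons, List.map_nil, join_cons, join_nil,
      wsBlock, List.take_nil, List.drop_nil, wsChunks_nil] at h ⊢
    rw [h]
    simp only [String.append_assoc, String.append_empty, String.empty_append]
  | cons x rest =>
    simp only [List.isEmpty_cons, Bool.false_eq_true, if_false]
    rw [h, wsChunks_cons, List.map_cons, join_cons]
    rw [show (x :: rest).take 74 = x :: rest.take 73 from by
          rw [show (74 : Nat) = 73 + 1 from rfl, List.take_succ_cons],
        show (x :: rest).drop 74 = rest.drop 73 from by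
          rw [show (74 : Nat) = 73 + 1 from rfl, List.drop_succ_cons]]
    simp only [wsBlock, List.map_cons, join_cons]
    simp [String.append_assoc]
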